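-- pv_equiv track=rewrite | github.com/boxcounter/d2l-exercises | chapter-10_modern-recurrent-neural-networks/9_machine_translation/machine_translation.py | _extract_valid_words
-- ===== SOURCE A (Python) =====
-- from collections import Counter
--
-- def _extract_valid_words(
--     lines_of_words: list[list[str]],
--     min_freq: int,
-- ) -> set[str]:
--     counter = Counter([word for line in lines_of_words for word in line])
--     if min_freq == 0:
--         return set(counter.keys())
--
--     return {word for word, count in counter.items() if count >= min_freq}
-- ===== SOURCE B (Python) =====
-- def _extract_valid_words(
--     lines_of_words: list[list[str]],
--     min_freq: int,
-- ) -> set[str]: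
--     # Sort the flattened words, then count each distinct word as the length of
--     # its run of equal adjacent elements; one uniform count >= min_freq filter.
--     flat = [word for line in lines_of_words for word in line]
--     ordered = sorted(flat)
--     counts = {}
--     i, n = 0, len(ordered)
--     while i < n:
--         j = i + 1
--         while j < n and ordered[j] == ordered[i]:
--             j += 1
--         counts[ordered[i]] = j - i
--         i = j
--     return {word for word in flat if counts[word] >= min_freq}
-- ===== Notes on version B (the rewrite author's own statement) =====
-- stated objective: alternative
-- what changed: Replaces hash counting (Counter) plus the special min_freq==0 branch by sort-then-scan: the flattened words are sorted and each distinct word's count is taken as the length of its run of equal adjacent elements, with one uniform count >= min_freq filter.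
import Mathlib
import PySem

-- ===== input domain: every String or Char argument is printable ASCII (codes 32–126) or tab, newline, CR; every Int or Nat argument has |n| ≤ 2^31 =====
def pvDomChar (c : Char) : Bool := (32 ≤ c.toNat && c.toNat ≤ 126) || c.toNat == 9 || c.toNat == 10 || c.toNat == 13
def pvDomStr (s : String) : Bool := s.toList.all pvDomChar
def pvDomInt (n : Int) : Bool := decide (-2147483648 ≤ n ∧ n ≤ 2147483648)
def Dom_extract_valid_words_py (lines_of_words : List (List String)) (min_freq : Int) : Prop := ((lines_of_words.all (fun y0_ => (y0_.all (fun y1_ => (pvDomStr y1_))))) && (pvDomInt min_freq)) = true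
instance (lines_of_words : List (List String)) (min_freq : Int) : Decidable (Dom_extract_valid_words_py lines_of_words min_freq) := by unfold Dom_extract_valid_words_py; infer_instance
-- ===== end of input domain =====

-- B replaces Counter-based hash counting and the min_freq==0 branch by sort-then-run-scan
-- counting with one uniform count >= min_freq filter (objective: alternative).
-- ===== PORT A =====
def extract_valid_words_py (lines_of_words : List (List String)) (min_freq : Int) : List String :=
  let counter := PySem.Dict.counter (lines_of_words.flatMap (fun line => line))
  if min_freq == 0 then PySem.Set.ofList counter.keys
  else PySem.Set.ofList ((counter.items.filter (fun p => decide (p.2 ≥ min_freq))).map (fun p => p.1))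

-- ===== PORT B =====
-- The while loop over indices i/j in Source B scans, for each run start, the maximal run of
-- elements equal to ordered[i] (the inner while is exactly takeWhile on the tail, the
-- advance of i to j exactly dropWhile), stores its length j-i, and continues after the run.
def pvRunCounts (counts : PySem.Dict String Int) : List String → PySem.Dict String Int
  | [] => counts
  | x :: xs =>
      pvRunCounts (counts.insert x (1 + ((xs.takeWhile (fun y => y == x)).length : Int)))
        (xs.dropWhile (fun y => y == x))
  termination_by l => l.length
  decreasing_by
    simp only [List.length_cons]
    exact Nat.lt_succ_of_le (List.dropWhile_sublist _).length_le

def extract_valid_words_py_alt (lines_of_words : List (List String)) (min_freq : Int) : List String :=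
  let flat := lines_of_words.flatMap (fun line => line)
  let ordered := PySem.List.sorted flat (fun w => w) false
  let counts := pvRunCounts PySem.Dict.empty ordered
  -- counts[word]: every word of flat is a key of counts (flat and ordered have the same
  -- members), so Python's KeyError branch is unreachable and getD _ 0 is exact here
  PySem.Set.ofList (flat.filter (fun w => decide (counts.getD w 0 ≥ min_freq)))

-- ===== PRECONDITION & SPEC =====
def Spec_extract_valid_words_py (lines_of_words : List (List String)) (min_freq : Int) (out : List String) : Prop := out = extract_valid_words_py_alt lines_of_words min_freq
instance (lines_of_words : List (List String)) (min_freq : Int) (out : List String) : Decidable (Spec_extract_valid_words_py lines_of_words min_freq out) := by unfold Spec_extract_valid_words_py; infer_instance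

-- ===== CLAIM =====
def Claim_equal_extract_valid_words_py : Prop := ∀ (lines_of_words : List (List String)) (min_freq : Int), Dom_extract_valid_words_py lines_of_words min_freq → Spec_extract_valid_words_py lines_of_words min_freq (extract_valid_words_py lines_of_words min_freq)

-- ===== LEMMAS AND PROOFS =====

-- On a ≤-sorted list the run scan records exactly the multiset count of every member.
lemma not_mem_dropWhile_of_pairwise (x : String) (xs : List String)
    (hp : (x :: xs).Pairwise (· ≤ ·)) : x ∉ xs.dropWhile (fun y => y == x) := by
  intro h
  cases hr : xs.dropWhile (fun y => y == x) with
  | nil => rw [hr] at h; exact absurd h (List.not_mem_nil)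
  | cons r0 r' =>
      have hne : xs.dropWhile (fun y => y == x) ≠ [] := by rw [hr]; simp
      have hr0 : ((xs.dropWhile (fun y => y == x)).head hne == x) = false :=
        List.head_dropWhile_not _ hne
      have hr0' : r0 ≠ x := by
        simp only [hr, List.head_cons] at hr0; simpa using hr0
      have hsub := (List.dropWhile_sublist (l := xs) (fun y => y == x))
      have hxle : ∀ y ∈ xs, x ≤ y := (List.pairwise_cons.mp hp).1
      have hxr0 : x ≤ r0 := hxle r0 (hsub.mem (by rw [hr]; exact List.mem_cons_self))
      have hpxs : xs.Pairwise (· ≤ ·) := (List.pairwise_cons.mp hp).2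
      have hpd : (xs.dropWhile (fun y => y == x)).Pairwise (· ≤ ·) := hpxs.sublist hsub
      rw [hr] at h hpd
      rcases List.mem_cons.mp h with h0 | h1
      · exact hr0' h0.symm
      · have : r0 ≤ x := (List.pairwise_cons.mp hpd).1 x h1
        exact hr0' (le_antisymm this hxr0)

lemma getD_pvRunCounts (d : PySem.Dict String Int) (l : List String)
    (hp : l.Pairwise (· ≤ ·)) (w : String) :
    (pvRunCounts d l).getD w 0 = if w ∈ l then (l.count w : Int) else d.getD w 0 := by
  induction d, l using pvRunCounts.induct with
  | case1 d => simp [pvRunCounts]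
  | case2 d x xs ih =>
      have hpxs : xs.Pairwise (· ≤ ·) := (List.pairwise_cons.mp hp).2
      have hsub := (List.dropWhile_sublist (l := xs) (fun y => y == x))
      have hpd : (xs.dropWhile (fun y => y == x)).Pairwise (· ≤ ·) := hpxs.sublist hsub
      have hxd : x ∉ xs.dropWhile (fun y => y == x) := not_mem_dropWhile_of_pairwise x xs hp
      have hsplit : xs.takeWhile (fun y => y == x) ++ xs.dropWhile (fun y => y == x) = xs :=
        List.takeWhile_append_dropWhile
      have htake : ∀ y ∈ xs.takeWhile (fun y => y == x), y = x := by
        intro y hy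
        have := List.mem_takeWhile_imp hy
        simpa using this
      have h3 := congrArg (List.count w) hsplit
      rw [List.count_append] at h3
      rw [pvRunCounts, ih hpd]
      by_cases hwx : w = x
      · subst hwx
        have h1 : (xs.takeWhile (fun y => y == w)).count w
            = (xs.takeWhile (fun y => y == w)).length :=
          List.count_eq_length.mpr (fun b hb => (htake b hb).symm)
        have h2 : (xs.dropWhile (fun y => y == w)).count w = 0 :=
          List.count_eq_zero.mpr hxd
        have h4 : List.count w (w :: xs) = List.count w xs + 1 := by
          simp
        rw [if_neg hxd, if_pos List.mem_cons_self, PySem.Dict.getD_insert, if_pos rfl, h4]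
        push_cast
        omega
      · by_cases hwd : w ∈ xs.dropWhile (fun y => y == x)
        · have hwxs : w ∈ xs := hsub.mem hwd
          have htc : (xs.takeWhile (fun y => y == x)).count w = 0 :=
            List.count_eq_zero.mpr (fun hmem => hwx (htake w hmem))
          have h4 : List.count w (x :: xs) = List.count w xs := by
            simp [Ne.symm hwx]
          rw [if_pos hwd, if_pos (List.mem_cons_of_mem _ hwxs), h4]
          omega
        · have hwxs : w ∉ xs := by
            rw [← hsplit]
            intro hmem
            rcases List.mem_append.mp hmem with h1 | h2
            · exact hwx (htake w h1)
            · exact hwd h2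
          simp [hwd, hwxs, hwx, PySem.Dict.getD_insert]

lemma filter_foldl_add (p : String → Bool) (xs : List String) :
    ∀ s : PySem.Set String,
      (List.foldl PySem.Set.add s xs).filter p = List.foldl PySem.Set.add (s.filter p) (xs.filter p) := by
  induction xs with
  | nil => intro s; simp
  | cons x xs ih =>
      intro s
      by_cases hpx : p x = true
      · have hadd : (PySem.Set.add s x).filter p = PySem.Set.add (s.filter p) x := by
          simp only [PySem.Set.add, PySem.Set.contains]
          by_cases hc : x ∈ s
          · simp [hc, hpx]
          · simp [hc, hpx]
        simp only [List.foldl_cons, List.filter_cons, hpx, if_true, List.foldl_cons]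
        rw [ih (PySem.Set.add s x), hadd]
      · have hpx' : p x = false := by simpa using hpx
        have hadd : (PySem.Set.add s x).filter p = s.filter p := by
          simp only [PySem.Set.add, PySem.Set.contains]
          by_cases hc : x ∈ s
          · simp [hc]
          · simp [hc, hpx']
        simp only [List.foldl_cons, List.filter_cons, hpx']
        rw [ih (PySem.Set.add s x), hadd]
        simp

lemma ofList_filter (p : String → Bool) (xs : List String) :
    (PySem.Set.ofList xs).filter p = PySem.Set.ofList (xs.filter p) := by
  have := filter_foldl_add p xs PySem.Set.empty
  simpa [PySem.Set.ofList, PySem.Set.empty] using this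

-- B reduces to filtering the flattened list by total count ≥ min_freq, then dedup.
lemma b_eval (lines_of_words : List (List String)) (min_freq : Int) :
    extract_valid_words_py_alt lines_of_words min_freq =
      (PySem.Set.ofList (lines_of_words.flatMap (fun line => line))).filter
        (fun w => decide (((lines_of_words.flatMap (fun line => line)).count w : Int) ≥ min_freq)) := by
  unfold extract_valid_words_py_alt
  dsimp only
  rw [ofList_filter]
  congr 1
  apply List.filter_congr
  intro w hw
  have hmem : w ∈ PySem.List.sorted (lines_of_words.flatMap (fun line => line)) (fun w => w) false :=
    (PySem.List.mem_sorted _ _ _ _).mpr hw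
  have hperm : (PySem.List.sorted (lines_of_words.flatMap (fun line => line)) (fun w => w) false).Perm
      (lines_of_words.flatMap (fun line => line)) := PySem.List.sorted_perm _ _ _
  have hpair : (PySem.List.sorted (lines_of_words.flatMap (fun line => line)) (fun w => w) false).Pairwise (· ≤ ·) := by
    simpa using (PySem.List.sorted_pairwise (xs := lines_of_words.flatMap (fun line => line)) (key := fun w => w))
  rw [getD_pvRunCounts _ _ hpair, if_pos hmem, hperm.count_eq]

theorem extract_valid_words_py_spec : Claim_equal_extract_valid_words_py := by
  intro lines_of_words min_freq _
  unfold Spec_extract_valid_words_py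
  rw [b_eval]
  unfold extract_valid_words_py
  by_cases h0 : min_freq = 0
  · simp only [h0, beq_self_eq_true, if_true, PySem.Dict.keys_counter]
    rw [PySem.Set.ofList_eq_self_of_nodup _ (PySem.Set.nodup_ofList _)]
    symm
    apply List.filter_eq_self.mpr
    intro w hw
    have : w ∈ lines_of_words.flatMap (fun line => line) := (PySem.Set.mem_ofList _ _).mp hw
    have := List.count_pos_iff.mpr this
    simp only [decide_eq_true_eq]
    omega
  · simp only [beq_iff_eq, h0, if_false, PySem.Dict.items_counter]
    rw [List.filter_map, List.map_map]
    rw [PySem.Set.ofList_eq_self_of_nodup _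
      ((PySem.Set.nodup_ofList _).filter _ |>.map (by intro a b h; simpa using h))]
    simp [Function.comp_def]
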